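-- pv_equiv track=rewrite | github.com/syashu16/ClauseCare_Nxtwave_Buildathon | rag_chatbot/document_processor.py | _find_section_for_position
-- ===== SOURCE A (Python) =====
-- from typing import Optional
--
-- def _find_section_for_position(pos: int, sections: dict[str, int]) -> Optional[str]:
--     """Find which section a character position belongs to"""
--     current_section = None
--
--     for section_name, section_pos in sorted(sections.items(), key=lambda x: x[1]):
--         if section_pos <= pos:
--             current_section = section_name
--         else:
--             break
--
--     return current_section
-- ===== SOURCE B (Python) =====
-- from typing import Optional
--
-- def _find_section_for_position(pos: int, sections: dict[str, int]) -> Optional[str]: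
--     """Single pass in dict order, no sort: keep the latest section whose start
--     position is <= pos and maximal (>= keeps the later entry on ties, matching
--     the stable sort-then-break behaviour)."""
--     best = None
--     for name, spos in sections.items():
--         if spos <= pos and (best is None or spos >= best[1]):
--             best = (name, spos)
--     return best[0] if best is not None else None
-- ===== Notes on version B (the rewrite author's own statement) =====
-- stated objective: faster
-- what changed: Replaced sort-then-scan-with-break by a single unsorted pass that keeps the last section with maximal start position <= pos (>= on ties reproduces the stable sort's tie-breaking).
import Mathlib
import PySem

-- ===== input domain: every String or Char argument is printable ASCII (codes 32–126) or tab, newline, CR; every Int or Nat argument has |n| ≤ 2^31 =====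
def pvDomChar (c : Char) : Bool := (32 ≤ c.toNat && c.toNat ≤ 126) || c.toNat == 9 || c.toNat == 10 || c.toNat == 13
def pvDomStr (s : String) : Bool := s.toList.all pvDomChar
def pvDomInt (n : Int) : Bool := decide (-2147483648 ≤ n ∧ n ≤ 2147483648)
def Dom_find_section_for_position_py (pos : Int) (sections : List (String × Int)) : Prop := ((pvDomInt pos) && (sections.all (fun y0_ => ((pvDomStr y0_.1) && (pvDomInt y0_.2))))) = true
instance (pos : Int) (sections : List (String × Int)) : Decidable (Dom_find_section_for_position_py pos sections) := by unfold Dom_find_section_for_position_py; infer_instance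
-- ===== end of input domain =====

-- B replaces A's sort-then-scan-with-break by a single unsorted pass keeping the
-- last section with maximal start position ≤ pos (faster: no sort).


-- ===== PORT A =====
-- A's for-loop with break over sorted(sections.items(), key=lambda x: x[1])
def scanA (pos : Int) : List (String × Int) → Option String → Option String
  | [], cur => cur
  | x :: t, cur => if x.2 ≤ pos then scanA pos t (some x.1) else cur

def find_section_for_position_py (pos : Int) (sections : List (String × Int)) : Option String :=
  scanA pos (PySem.List.sorted sections (fun x => x.2)) none

-- ===== PORT B =====
-- B's loop body: update best when spos <= pos and (best is None or spos >= best[1])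
def stepB (pos : Int) (best : Option (String × Int)) (x : String × Int) : Option (String × Int) :=
  if decide (x.2 ≤ pos) && (match best with | none => true | some b => decide (b.2 ≤ x.2)) then
    some x
  else best

def find_section_for_position_py_alt (pos : Int) (sections : List (String × Int)) : Option String :=
  match sections.foldl (stepB pos) none with
  | some b => some b.1
  | none => none

-- ===== PRECONDITION & SPEC =====
def Spec_find_section_for_position_py (pos : Int) (sections : List (String × Int)) (out : Option String) : Prop := out = find_section_for_position_py_alt pos sections
instance (pos : Int) (sections : List (String × Int)) (out : Option String) : Decidable (Spec_find_section_for_position_py pos sections out) := by unfold Spec_find_section_for_position_py; infer_instance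

-- ===== CLAIM (what is proved, stated in full; the proofs are below) =====
def Claim_equal_find_section_for_position_py : Prop := ∀ (pos : Int) (sections : List (String × Int)), Dom_find_section_for_position_py pos sections → Spec_find_section_for_position_py pos sections (find_section_for_position_py pos sections)

-- ===== LEMMAS AND PROOFS =====

-- pair-valued version of A's scan (keeps the position alongside the name)
def scanP (pos : Int) : List (String × Int) → Option (String × Int) → Option (String × Int)
  | [], b => b
  | x :: t, b => if x.2 ≤ pos then scanP pos t (some x) else b

theorem scanA_eq_scanP (pos : Int) (ys : List (String × Int)) (b : Option (String × Int)) :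
    scanA pos ys (b.map Prod.fst) = (scanP pos ys b).map Prod.fst := by
  induction ys generalizing b with
  | nil => rfl
  | cons x t ih =>
    simp only [scanA, scanP]
    by_cases h : x.2 ≤ pos
    · simp only [if_pos h]
      exact ih (some x)
    · simp [if_neg h]

-- on a sorted list with eligible head, the scan returns some element with key ≥ the head's
theorem scanP_head_le (pos : Int) (t : List (String × Int)) (x : String × Int)
    (b : Option (String × Int)) (hx : x.2 ≤ pos)
    (hp : (x :: t).Pairwise (fun a b => a.2 ≤ b.2)) :
    ∃ m, scanP pos (x :: t) b = some m ∧ x.2 ≤ m.2 := by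
  induction t generalizing x b with
  | nil => exact ⟨x, by simp [scanP, hx], le_refl _⟩
  | cons y t' ih =>
    have hxy : x.2 ≤ y.2 := (List.pairwise_cons.1 hp).1 y (by simp)
    by_cases hy : y.2 ≤ pos
    · obtain ⟨m, hm, hym⟩ := ih y (some x) hy (List.pairwise_cons.1 hp).2
      refine ⟨m, ?_, le_trans hxy hym⟩
      simpa [scanP, hx] using hm
    · exact ⟨x, by simp [scanP, hx, hy], le_refl _⟩

-- scanning a sorted list into which x was stably inserted = one B-step on the plain scan
theorem scanP_insertBy (pos : Int) (ys : List (String × Int)) (x : String × Int)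
    (b : Option (String × Int))
    (hs : ys.Pairwise (fun a b => a.2 ≤ b.2))
    (hb : b = none ∨ ∃ q, b = some q ∧ q.2 ≤ x.2 ∧ ∀ y ∈ ys, q.2 ≤ y.2) :
    scanP pos (PySem.List.insertBy (fun a b => decide (a.2 < b.2)) x ys) b
      = stepB pos (scanP pos ys b) x := by
  induction ys generalizing b with
  | nil =>
    rcases hb with rfl | ⟨q, rfl, hq, -⟩
    · by_cases h : x.2 ≤ pos <;> simp [PySem.List.insertBy, scanP, stepB, h]
    · by_cases h : x.2 ≤ pos <;> simp [PySem.List.insertBy, scanP, stepB, h, hq]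
  | cons y t ih =>
    have hyt := List.pairwise_cons.1 hs
    by_cases hcmp : x.2 < y.2
    · -- x inserted in front of y
      simp only [PySem.List.insertBy, hcmp, decide_true, if_true]
      by_cases hx : x.2 ≤ pos
      · by_cases hy : y.2 ≤ pos
        · -- scan passes y either way; result has key ≥ y.2 > x.2, step is a no-op
          obtain ⟨m, hm, hym⟩ := scanP_head_le pos t y (some x) hy hs
          have hm' : scanP pos (y :: t) b = some m := by
            simpa [scanP, hy] using (by simpa [scanP, hy] using hm : scanP pos t (some y) = some m)
          have : scanP pos (x :: y :: t) b = some m := by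
            simpa [scanP, hx, hy] using (by simpa [scanP, hy] using hm : scanP pos t (some y) = some m)
          rw [this, hm']
          have hmx : ¬ m.2 ≤ x.2 := by omega
          simp [stepB, hmx]
        · -- y breaks the scan in both lists
          have h1 : scanP pos (x :: y :: t) b = some x := by simp [scanP, hx, hy]
          have h2 : scanP pos (y :: t) b = b := by simp [scanP, hy]
          rw [h1, h2]
          rcases hb with rfl | ⟨q, rfl, hq, -⟩
          · simp [stepB, hx]
          · simp [stepB, hx, hq]
      · -- x ineligible: breaks immediately; y.2 > x.2 > pos breaks too
        have hy : ¬ y.2 ≤ pos := by omega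
        have h1 : scanP pos (x :: y :: t) b = b := by simp [scanP, hx]
        have h2 : scanP pos (y :: t) b = b := by simp [scanP, hy]
        rw [h1, h2]
        simp [stepB, hx]
    · -- y.2 ≤ x.2 : x inserted further right
      simp only [PySem.List.insertBy, hcmp, decide_false, Bool.false_eq_true, if_false]
      have hyx : y.2 ≤ x.2 := by omega
      by_cases hy : y.2 ≤ pos
      · have hb' : some y = none ∨ ∃ q, (some y : Option (String × Int)) = some q ∧ q.2 ≤ x.2 ∧ ∀ z ∈ t, q.2 ≤ z.2 :=
          Or.inr ⟨y, rfl, hyx, hyt.1⟩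
        have := ih (some y) hyt.2 hb'
        simpa [scanP, hy] using this
      · have hx : ¬ x.2 ≤ pos := by omega
        have h2 : scanP pos (y :: t) b = b := by simp [scanP, hy]
        rw [h2]
        simp [scanP, hy, stepB, hx]

theorem scanP_sorted_eq_foldl (pos : Int) (xs : List (String × Int)) :
    scanP pos (PySem.List.sorted xs (fun a => a.2)) none = xs.foldl (stepB pos) none := by
  induction xs using List.reverseRecOn with
  | nil => simp [PySem.List.sorted_eq_foldl_insertBy, scanP]
  | append_singleton xs x ih =>
    have hins : PySem.List.sorted (xs ++ [x]) (fun a => a.2)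
        = PySem.List.insertBy (fun a b => decide (a.2 < b.2)) x (PySem.List.sorted xs (fun a => a.2)) := by
      rw [PySem.List.sorted_eq_foldl_insertBy, PySem.List.sorted_eq_foldl_insertBy, List.foldl_append]
      rfl
    rw [hins, scanP_insertBy pos _ x none (PySem.List.sorted_pairwise xs (fun a => a.2)) (Or.inl rfl),
        ih, List.foldl_append]
    rfl

-- ===== VERDICT (by name: the statement is the Claim_ definition above) =====
theorem find_section_for_position_py_spec : Claim_equal_find_section_for_position_py := by
  intro pos sections _
  unfold Spec_find_section_for_position_py find_section_for_position_py find_section_for_position_py_alt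
  have h := scanA_eq_scanP pos (PySem.List.sorted sections (fun x => x.2)) none
  simp only [Option.map_none] at h
  rw [h, scanP_sorted_eq_foldl]
  cases sections.foldl (stepB pos) none <;> rfl
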